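-- pv_equiv track=rewrite | github.com/longcipher/pb-spec | src/pb_spec/validation/design.py | _has_subsections
-- ===== SOURCE A (Python) =====
-- def _has_subsections(section_name: str, sections: list[tuple[str, str, int]]) -> bool:
--     """Check whether a section has child subsections at a deeper heading level."""
--     idx = None
--     parent_level = 0
--     for i, (name, _, level) in enumerate(sections):
--         if name == section_name:
--             idx = i
--             parent_level = level
--             break
--     if idx is None:
--         return False
--     for _, _, level in sections[idx + 1 :]:
--         if level > parent_level:
--             return True
--         break
--     return False
-- ===== SOURCE B (Python) =====
-- def _has_subsections(section_name: str, sections: list[tuple[str, str, int]]) -> bool: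
--     # Backwards pass: carry the level of the section that FOLLOWS the current one;
--     # overwriting on each match makes the earliest match win.
--     result = False
--     following_level = None
--     for name, _, level in reversed(sections):
--         if name == section_name:
--             result = following_level is not None and following_level > level
--         following_level = level
--     return result
-- ===== Notes on version B (the rewrite author's own statement) =====
-- stated objective: alternative
-- what changed: Replaced the forward locate-then-peek two-loop structure by a single backwards pass that carries the level of the following section and overwrites the result on each match so the first match wins.
import Mathlib
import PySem

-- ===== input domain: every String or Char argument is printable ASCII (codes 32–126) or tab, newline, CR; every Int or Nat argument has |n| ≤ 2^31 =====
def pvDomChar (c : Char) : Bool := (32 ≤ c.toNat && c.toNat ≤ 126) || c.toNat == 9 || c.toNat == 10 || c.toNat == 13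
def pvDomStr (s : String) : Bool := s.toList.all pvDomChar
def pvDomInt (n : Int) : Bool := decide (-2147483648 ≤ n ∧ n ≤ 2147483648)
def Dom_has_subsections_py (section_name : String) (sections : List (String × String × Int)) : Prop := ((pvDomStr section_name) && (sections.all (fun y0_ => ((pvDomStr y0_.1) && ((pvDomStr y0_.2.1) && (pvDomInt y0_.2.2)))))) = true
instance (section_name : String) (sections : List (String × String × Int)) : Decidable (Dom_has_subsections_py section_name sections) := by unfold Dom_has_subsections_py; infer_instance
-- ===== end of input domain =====

-- B replaces A's forward locate-then-peek two-loop scan by one backwards pass with an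
-- accumulator (objective: alternative decomposition; same O(n) cost).

-- ===== PORT A =====
-- first loop of A: enumerate, break at the first name match, returning (i, level)
def pvFindA (section_name : String) : Nat → List (String × String × Int) → Option (Nat × Int)
  | _, [] => none
  | i, (name, _, level) :: t =>
      if name = section_name then some (i, level) else pvFindA section_name (i + 1) t

def has_subsections_py (section_name : String) (sections : List (String × String × Int)) : Bool :=
  match pvFindA section_name 0 sections with
  | none => false
  | some (idx, parent_level) =>
      -- sections[idx + 1:] with idx + 1 ≥ 0 is exactly drop (idx + 1); the second
      -- loop breaks after its first element
      match sections.drop (idx + 1) with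
      | [] => false
      | (_, _, level) :: _ => level > parent_level

-- ===== PORT B =====
-- B's loop body: state = (result, following_level); updated per element of reversed(sections)
def pvStepB (section_name : String) (st : Bool × Option Int) (x : String × String × Int) :
    Bool × Option Int :=
  ((if x.1 = section_name then
      (match st.2 with
       | some fl => decide (fl > x.2.2)
       | none => false)
    else st.1), some x.2.2)

def has_subsections_py_alt (section_name : String) (sections : List (String × String × Int)) : Bool :=
  (sections.reverse.foldl (pvStepB section_name) (false, none)).1

-- ===== PRECONDITION & SPEC =====
def Spec_has_subsections_py (section_name : String) (sections : List (String × String × Int)) (out : Bool) : Prop := out = has_subsections_py_alt section_name sections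
instance (section_name : String) (sections : List (String × String × Int)) (out : Bool) : Decidable (Spec_has_subsections_py section_name sections out) := by unfold Spec_has_subsections_py; infer_instance

-- ===== CLAIM (what is proved, stated in full; the proofs are below) =====
def Claim_equal_has_subsections_py : Prop := ∀ (section_name : String) (sections : List (String × String × Int)), Dom_has_subsections_py section_name sections → Spec_has_subsections_py section_name sections (has_subsections_py section_name sections)

-- ===== LEMMAS AND PROOFS =====
-- foldl over the reverse is a foldr; work with G below
def pvG (sn : String) (ss : List (String × String × Int)) : Bool × Option Int :=
  ss.foldr (fun x st => pvStepB sn st x) (false, none)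

theorem pvAlt_eq_G (sn : String) (ss : List (String × String × Int)) :
    has_subsections_py_alt sn ss = (pvG sn ss).1 := by
  simp [has_subsections_py_alt, pvG, List.foldl_reverse]

theorem pvFindA_shift (sn : String) (t : List (String × String × Int)) (i : Nat) :
    pvFindA sn (i + 1) t = (pvFindA sn i t).map (fun p => (p.1 + 1, p.2)) := by
  induction t generalizing i with
  | nil => simp [pvFindA]
  | cons h t ih =>
      obtain ⟨n, d, l⟩ := h
      by_cases hn : n = sn <;> simp [pvFindA, hn, ih]

theorem pv_main (sn : String) (ss : List (String × String × Int)) :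
    has_subsections_py sn ss = (pvG sn ss).1 := by
  induction ss with
  | nil => rfl
  | cons h t ih =>
      obtain ⟨n, d, l⟩ := h
      by_cases hn : n = sn
      · cases t with
        | nil => simp [has_subsections_py, pvFindA, pvStepB, pvG, hn]
        | cons h' t' =>
            obtain ⟨n', d', l'⟩ := h'
            simp [has_subsections_py, pvFindA, pvG, pvStepB, hn]
      · have hA : has_subsections_py sn ((n, d, l) :: t) = has_subsections_py sn t := by
          simp only [has_subsections_py, pvFindA, if_neg hn, pvFindA_shift]
          cases hf : pvFindA sn 0 t with
          | none => simp
          | some p => obtain ⟨j, pl⟩ := p; simp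
        have hG : pvG sn ((n, d, l) :: t) = pvStepB sn (pvG sn t) (n, d, l) := rfl
        rw [hA, ih, hG]
        simp [pvStepB, hn]

-- ===== VERDICT (by name: the statement is the Claim_ definition above) =====
theorem has_subsections_py_spec : Claim_equal_has_subsections_py := by
  intro sn ss _
  unfold Spec_has_subsections_py
  rw [pv_main, pvAlt_eq_G]
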